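-- pv_equiv track=rewrite | github.com/Tschichen/AdventOfCode2019 | day8/day8.py | build_layers
-- ===== SOURCE A (Python) =====
-- def build_layers(input):
--     layer_array = []
--     i = 0
--     while i < len(input):
--         word = input[i:i+25]
--         layer_array.append(word)
--         i += 25
--
--     final_layers = []
--     for i in range(len(layer_array)):
--         if i % 6 == 0:
--             single_layer = []
--             single_layer.append(layer_array[i])
--             final_layers.append(single_layer)
--         else:
--             final_layers[-1].append(layer_array[i])
--
--     return final_layers
-- ===== SOURCE B (Python) =====
-- def build_layers(input):
--     layers = []
--     while input:
--         block, input = input[:150], input[150:]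
--         rows = []
--         while block:
--             rows.append(block[:25])
--             block = block[25:]
--         layers.append(rows)
--     return layers
-- ===== Notes on version B (the rewrite author's own statement) =====
-- stated objective: simpler
-- what changed: B peels one whole 150-char layer block at a time and splits each block into 25-char rows with a nested loop, instead of A's flat 25-char chunk list followed by an index-modulo-6 regrouping pass.
import Mathlib
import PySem

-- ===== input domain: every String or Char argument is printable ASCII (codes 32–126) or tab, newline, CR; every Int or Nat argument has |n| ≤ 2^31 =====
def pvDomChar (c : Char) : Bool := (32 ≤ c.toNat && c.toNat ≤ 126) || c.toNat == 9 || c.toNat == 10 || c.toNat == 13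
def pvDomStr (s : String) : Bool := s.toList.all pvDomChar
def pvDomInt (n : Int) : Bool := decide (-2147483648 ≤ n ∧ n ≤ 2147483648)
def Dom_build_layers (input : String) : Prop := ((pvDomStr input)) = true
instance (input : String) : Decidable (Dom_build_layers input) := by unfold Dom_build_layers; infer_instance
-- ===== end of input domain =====

-- B builds each layer directly by slicing 150-char blocks into 25-char rows, replacing A's flat chunk list plus i%6 regrouping (simpler decomposition, same cost).

-- ===== PORT A =====
-- the while loop slicing input[i:i+25]: recursion on the remaining suffix (input[i:] ), word = take 25
def pvChunkA (cs : List Char) : List String :=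
  match cs with
  | [] => []
  | c :: rest => String.ofList ((c :: rest).take 25) :: pvChunkA (rest.drop 24)
termination_by cs.length
decreasing_by simp

-- body of 'for i in range(len(layer_array))': pair (layer_array[i], i) comes from zipIdx
def pvStepA (acc : List (List String)) (p : String × Nat) : List (List String) :=
  if p.2 % 6 == 0 then acc ++ [[p.1]]
  else acc.dropLast ++ [acc.getLastD [] ++ [p.1]]   -- final_layers[-1].append(...); acc is nonempty here

def build_layers (input : String) : List (List String) :=
  let layer_array := pvChunkA input.toList
  (layer_array.zipIdx).foldl pvStepA []

-- ===== PORT B =====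
-- inner while: rows.append(block[:25]); block = block[25:]
def pvRowsB (block : List Char) : List String :=
  match block with
  | [] => []
  | c :: rest => String.ofList ((c :: rest).take 25) :: pvRowsB (rest.drop 24)
termination_by block.length
decreasing_by simp

-- outer while: block = input[:150]; input = input[150:]
def pvLayersB (cs : List Char) : List (List String) :=
  match cs with
  | [] => []
  | c :: rest => pvRowsB ((c :: rest).take 150) :: pvLayersB (rest.drop 149)
termination_by cs.length
decreasing_by simp

def build_layers_alt (input : String) : List (List String) :=
  pvLayersB input.toList

-- ===== PRECONDITION & SPEC =====
def Spec_build_layers (input : String) (out : List (List String)) : Prop := out = build_layers_alt input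
instance (input : String) (out : List (List String)) : Decidable (Spec_build_layers input out) := by unfold Spec_build_layers; infer_instance

-- ===== CLAIM (what is proved, stated in full; the proofs are below) =====
def Claim_equal_build_layers : Prop := ∀ (input : String), Dom_build_layers input → Spec_build_layers input (build_layers input)

-- ===== LEMMAS AND PROOFS =====

-- group a word list into layers of 6 (common characterisation of both programs)
def g6 : List String → List (List String)
  | [] => []
  | w :: rest => (w :: rest.take 5) :: g6 (rest.drop 5)
termination_by l => l.length
decreasing_by simp

@[simp] lemma chunkA_nil : pvChunkA [] = [] := by rw [pvChunkA.eq_1]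
lemma chunkA_cons (c : Char) (rest : List Char) :
    pvChunkA (c :: rest) = String.ofList ((c :: rest).take 25) :: pvChunkA (rest.drop 24) := by
  rw [pvChunkA.eq_2]
@[simp] lemma g6_nil : g6 [] = [] := by rw [g6.eq_1]
lemma g6_cons (w : String) (rest : List String) :
    g6 (w :: rest) = (w :: rest.take 5) :: g6 (rest.drop 5) := by rw [g6.eq_2]

lemma chunkA_take (k : Nat) (cs : List Char) :
    pvChunkA (cs.take (25 * k)) = (pvChunkA cs).take k := by
  induction k generalizing cs with
  | zero => simp
  | succ k ih =>
    cases cs with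
    | nil => simp
    | cons c rest =>
      have h1 : (c :: rest).take (25 * (k + 1)) = c :: rest.take (25 * k + 24) := by
        have : 25 * (k + 1) = (25 * k + 24) + 1 := by ring
        simp [this]
      rw [h1, chunkA_cons, chunkA_cons]
      simp only [List.take_succ_cons]
      have h2 : (rest.take (25 * k + 24)).take 24 = rest.take 24 := by
        rw [List.take_take]
        have : min 24 (25 * k + 24) = 24 := by omega
        rw [this]
      have h3 : (rest.take (25 * k + 24)).drop 24 = (rest.drop 24).take (25 * k) := by
        rw [List.drop_take]
        have : 25 * k + 24 - 24 = 25 * k := by omega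
        rw [this]
      rw [h2, h3, ih]

lemma chunkA_drop (k : Nat) (cs : List Char) :
    pvChunkA (cs.drop (25 * k)) = (pvChunkA cs).drop k := by
  induction k generalizing cs with
  | zero => simp
  | succ k ih =>
    cases cs with
    | nil => simp
    | cons c rest =>
      have h1 : (c :: rest).drop (25 * (k + 1)) = (rest.drop 24).drop (25 * k) := by
        have e : 25 * (k + 1) = (25 * k + 24) + 1 := by ring
        rw [e, List.drop_succ_cons, List.drop_drop]
        have : 25 * k + 24 = 24 + 25 * k := by omega
        rw [this]
      rw [h1, ih, chunkA_cons]
      simp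

lemma rowsB_eq_chunkA (b : List Char) : pvRowsB b = pvChunkA b := by
  fun_induction pvRowsB b with
  | case1 => simp
  | case2 c rest ih => rw [chunkA_cons, ih]

lemma layersB_eq_g6 (cs : List Char) : pvLayersB cs = g6 (pvChunkA cs) := by
  fun_induction pvLayersB cs with
  | case1 => simp
  | case2 c rest ih =>
    have ht : pvChunkA ((c :: rest).take (25 * 6)) = (pvChunkA (c :: rest)).take 6 :=
      chunkA_take 6 (c :: rest)
    have hd : pvChunkA ((c :: rest).drop (25 * 6)) = (pvChunkA (c :: rest)).drop 6 :=
      chunkA_drop 6 (c :: rest)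
    have e1 : (c :: rest).take (25 * 6) = (c :: rest).take 150 := by norm_num
    have e2 : (c :: rest).drop (25 * 6) = rest.drop 149 := by
      norm_num [List.drop_succ_cons]
    rw [e1] at ht
    rw [e2] at hd
    rw [rowsB_eq_chunkA, ht, ih, hd, chunkA_cons, g6_cons]
    simp

lemma foldA_inv (ws : List String) (n : Nat) (done : List (List String)) (cur : List String)
    (h : cur.length = n % 6) :
    List.foldl pvStepA (done ++ if cur = [] then [] else [cur]) (ws.zipIdx n)
      = done ++ (if cur = [] then g6 ws
                 else (cur ++ ws.take (6 - cur.length)) :: g6 (ws.drop (6 - cur.length))) := by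
  induction ws generalizing n done cur with
  | nil =>
    by_cases hc : cur = [] <;> simp [hc]
  | cons x ws' ih =>
    rw [List.zipIdx_cons, List.foldl_cons]
    by_cases h0 : n % 6 = 0
    · have hcur : cur = [] := List.eq_nil_of_length_eq_zero (by omega)
      subst hcur
      simp only [reduceIte, List.append_nil]
      have hstep : pvStepA done (x, n) = done ++ [[x]] := by
        simp [pvStepA, h0]
      rw [hstep]
      have h1 : ([x] : List String).length = (n + 1) % 6 := by simp; omega
      have key := ih (n + 1) done [x] h1
      simp only [if_neg (by simp : ¬ ([x] : List String) = [])] at key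
      rw [key, g6_cons]
      simp
    · have hne : ¬ cur = [] := by
        intro hc; subst hc; simp at h; omega
      simp only [if_neg hne]
      have hstep : pvStepA (done ++ [cur]) (x, n) = done ++ [cur ++ [x]] := by
        simp only [pvStepA, beq_iff_eq, if_neg h0, List.dropLast_concat,
          List.getLastD_concat]
      rw [hstep]
      by_cases h5 : n % 6 = 5
      · have h1 : ([] : List String).length = (n + 1) % 6 := by simp; omega
        have key := ih (n + 1) (done ++ [cur ++ [x]]) [] h1
        simp only [reduceIte, List.append_nil] at key
        rw [key, List.append_assoc]
        have h6 : 6 - cur.length = 1 := by omega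
        simp [h6]
      · have h1 : (cur ++ [x]).length = (n + 1) % 6 := by simp; omega
        have key := ih (n + 1) done (cur ++ [x]) h1
        simp only [if_neg (by simp : ¬ cur ++ [x] = [])] at key
        rw [key]
        have e1 : 6 - (cur ++ [x]).length = 5 - cur.length := by
          simp only [List.length_append, List.length_cons, List.length_nil]; omega
        have e2 : 6 - cur.length = (5 - cur.length) + 1 := by omega
        rw [e1, e2]
        simp [List.take_succ_cons, List.drop_succ_cons]

lemma foldA_eq_g6 (ws : List String) :
    (ws.zipIdx).foldl pvStepA [] = g6 ws := by
  have key := foldA_inv ws 0 [] [] (by simp)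
  simpa using key

-- ===== VERDICT (by name: the statement is the Claim_ definition above) =====
theorem build_layers_spec : Claim_equal_build_layers := by
  intro input _
  unfold Spec_build_layers build_layers build_layers_alt
  rw [layersB_eq_g6, ← foldA_eq_g6]
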